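-- pv_equiv track=rewrite | github.com/Renzo-Olivares/flutter-agent-skills | text_input_issue_analysis/scripts/build_category_profiles.py | classify_tilt
-- ===== SOURCE A (Python) =====
-- BUG_LABELS = {"c: crash", "c: fatal crash", "c: regression", "c: performance", "c: flake"}
--
-- FEATURE_LABELS = {"c: proposal", "c: new feature", "c: new widget"}
--
-- def classify_tilt(labels):
--     """Return (bug_count, feature_count, other_typed_count, unlabeled) for one issue."""
--     c_labels = [l for l in labels if l.startswith("c: ")]
--     if not c_labels:
--         return (0, 0, 0, 1)
--     bug = 1 if any(l in BUG_LABELS for l in c_labels) else 0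
--     feat = 1 if any(l in FEATURE_LABELS for l in c_labels) else 0
--     # If an issue has both (rare) count as both; count "other" only if neither.
--     other = 1 if (not bug and not feat) else 0
--     return (bug, feat, other, 0)
-- ===== SOURCE B (Python) =====
-- BUG_LABELS = {"c: crash", "c: fatal crash", "c: regression", "c: performance", "c: flake"}
--
-- FEATURE_LABELS = {"c: proposal", "c: new feature", "c: new widget"}
--
-- def classify_tilt(labels):
--     """Return (bug_count, feature_count, other_typed_count, unlabeled) for one issue."""
--     has_c = bug = feat = False
--     for l in labels:
--         if l.startswith("c: "):
--             has_c = True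
--         if l in BUG_LABELS:
--             bug = True
--         if l in FEATURE_LABELS:
--             feat = True
--     if not has_c:
--         return (0, 0, 0, 1)
--     return (int(bug), int(feat), int(not bug and not feat), 0)
-- ===== Notes on version B (the rewrite author's own statement) =====
-- stated objective: simpler
-- what changed: Replaced the intermediate c_labels list plus two separate any-scans over it with a single pass over the labels that maintains three boolean flags (valid because every BUG/FEATURE label itself starts with 'c: ').
import Mathlib
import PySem

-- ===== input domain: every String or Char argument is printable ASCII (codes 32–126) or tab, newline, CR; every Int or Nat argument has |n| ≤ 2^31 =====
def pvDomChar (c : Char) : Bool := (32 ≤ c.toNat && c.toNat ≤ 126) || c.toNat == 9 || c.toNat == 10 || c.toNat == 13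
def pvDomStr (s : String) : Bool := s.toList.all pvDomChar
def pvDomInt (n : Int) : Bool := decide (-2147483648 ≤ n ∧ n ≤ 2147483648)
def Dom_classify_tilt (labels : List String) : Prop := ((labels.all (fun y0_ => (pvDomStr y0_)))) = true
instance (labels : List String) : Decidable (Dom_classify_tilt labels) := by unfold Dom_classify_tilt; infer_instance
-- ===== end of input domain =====

-- B replaces the intermediate c_labels list plus two any-scans with one single-pass
-- loop over labels maintaining three boolean flags (objective: simpler).

-- ===== PORT A =====
def BUG_LABELS : PySem.Set String :=
  PySem.Set.ofList ["c: crash", "c: fatal crash", "c: regression", "c: performance", "c: flake"]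

def FEATURE_LABELS : PySem.Set String :=
  PySem.Set.ofList ["c: proposal", "c: new feature", "c: new widget"]

def classify_tilt (labels : List String) : Int × Int × Int × Int :=
  let c_labels := labels.filter (fun l => PySem.Str.startswith l "c: ")
  if c_labels = [] then (0, 0, 0, 1)
  else
    let bug : Int := if c_labels.any (fun l => PySem.Set.contains BUG_LABELS l) then 1 else 0
    let feat : Int := if c_labels.any (fun l => PySem.Set.contains FEATURE_LABELS l) then 1 else 0
    let other : Int := if bug = 0 ∧ feat = 0 then 1 else 0
    (bug, feat, other, 0)

-- ===== PORT B =====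
def classify_tilt_alt (labels : List String) : Int × Int × Int × Int :=
  let st := labels.foldl
    (fun (s : Bool × Bool × Bool) l =>
      ((if PySem.Str.startswith l "c: " then true else s.1),
       (if PySem.Set.contains BUG_LABELS l then true else s.2.1),
       (if PySem.Set.contains FEATURE_LABELS l then true else s.2.2)))
    (false, false, false)
  if st.1 = false then (0, 0, 0, 1)
  else ((if st.2.1 then (1 : Int) else 0), (if st.2.2 then (1 : Int) else 0),
        (if !st.2.1 && !st.2.2 then (1 : Int) else 0), 0)

-- ===== PRECONDITION & SPEC =====
def Spec_classify_tilt (labels : List String) (out : Int × Int × Int × Int) : Prop := out = classify_tilt_alt labels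
instance (labels : List String) (out : Int × Int × Int × Int) : Decidable (Spec_classify_tilt labels out) := by unfold Spec_classify_tilt; infer_instance

-- ===== CLAIM (what is proved, stated in full; the proofs are below) =====
def Claim_equal_classify_tilt : Prop := ∀ (labels : List String), Dom_classify_tilt labels → Spec_classify_tilt labels (classify_tilt labels)

-- ===== LEMMAS AND PROOFS =====

-- ===== VERDICT (by name: the statement is the Claim_ definition above) =====
-- state of B's fold equals (any startswith, any in BUG, any in FEAT)
theorem fold_state (labels : List String) (a b c : Bool) :
    labels.foldl
      (fun (s : Bool × Bool × Bool) l =>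
        ((if PySem.Str.startswith l "c: " then true else s.1),
         (if PySem.Set.contains BUG_LABELS l then true else s.2.1),
         (if PySem.Set.contains FEATURE_LABELS l then true else s.2.2)))
      (a, b, c)
    = (a || labels.any (fun l => PySem.Str.startswith l "c: "),
       b || labels.any (fun l => PySem.Set.contains BUG_LABELS l),
       c || labels.any (fun l => PySem.Set.contains FEATURE_LABELS l)) := by
  induction labels generalizing a b c with
  | nil => simp
  | cons h t ih =>
    simp only [List.foldl_cons, List.any_cons, ih]
    by_cases h1 : PySem.Str.startswith h "c: " = true <;>
      by_cases h2 : PySem.Set.contains BUG_LABELS h = true <;>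
      by_cases h3 : PySem.Set.contains FEATURE_LABELS h = true <;>
      simp_all

theorem bug_starts (l : String) (h : PySem.Set.contains BUG_LABELS l = true) :
    PySem.Str.startswith l "c: " = true := by
  rw [PySem.Set.contains_iff] at h
  simp only [BUG_LABELS, PySem.Set.mem_ofList, List.mem_cons, List.mem_singleton,
    List.not_mem_nil, or_false] at h
  rcases h with h | h | h | h | h <;> subst h <;> decide

theorem feat_starts (l : String) (h : PySem.Set.contains FEATURE_LABELS l = true) :
    PySem.Str.startswith l "c: " = true := by
  rw [PySem.Set.contains_iff] at h
  simp only [FEATURE_LABELS, PySem.Set.mem_ofList, List.mem_cons, List.mem_singleton,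
    List.not_mem_nil, or_false] at h
  rcases h with h | h | h <;> subst h <;> decide

theorem any_filter_of_imp (labels : List String) (q : String → Bool)
    (himp : ∀ l, q l = true → PySem.Str.startswith l "c: " = true) :
    (labels.filter (fun l => PySem.Str.startswith l "c: ")).any q = labels.any q := by
  induction labels with
  | nil => rfl
  | cons h t ih =>
    by_cases hs : PySem.Str.startswith h "c: " = true
    · rw [List.filter_cons, if_pos (by exact hs), List.any_cons, List.any_cons, ih]
    · have hq : q h = false := by
        cases hqe : q h
        · rfl
        · exact absurd (himp h hqe) hs
      rw [List.filter_cons, if_neg (by simpa using hs), List.any_cons, ih, hq,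
        Bool.false_or]

theorem classify_tilt_spec : Claim_equal_classify_tilt := by
  intro labels _
  unfold Spec_classify_tilt classify_tilt classify_tilt_alt
  simp only [fold_state, Bool.false_or]
  rw [any_filter_of_imp labels _ bug_starts, any_filter_of_imp labels _ feat_starts]
  by_cases hc : labels.filter (fun l => PySem.Str.startswith l "c: ") = []
  · have hno : labels.any (fun l => PySem.Str.startswith l "c: ") = false := by
      simp only [List.filter_eq_nil_iff] at hc
      simp only [List.any_eq_false]
      exact hc
    rw [if_pos hc, if_pos hno]
  · have hany : labels.any (fun l => PySem.Str.startswith l "c: ") = true := by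
      rcases List.exists_mem_of_ne_nil _ hc with ⟨l, hl⟩
      rw [List.mem_filter] at hl
      exact List.any_eq_true.mpr ⟨l, hl.1, hl.2⟩
    rw [if_neg hc]
    simp only [hany, Bool.true_eq_false, if_false]
    by_cases hb : ∃ x ∈ labels, x ∈ BUG_LABELS <;>
      by_cases hf : ∃ x ∈ labels, x ∈ FEATURE_LABELS <;>
      simp [hb, hf]
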